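-- pv_equiv track=rewrite | github.com/dice-group/KBQA-PG | KBQA/summarizers/ranking/ranking.py | filter_table_until_last_rank
-- ===== SOURCE A (Python) =====
-- from typing import Dict
-- from typing import Tuple
--
-- def filter_table_until_last_rank(
--     subgraph_triples_ranked: dict, limit: int
-- ) -> Tuple[Dict, int]:
--     """
--     Given table with all triples of subgraph and rank for all of them. First "limit" + all triples with the last rank are returned.
--
--     This procedure returns "limit" triples. If there are triples with the same rank in the table, they will be returned additionally.
--     :param subgraph_triples_ranked: dictionary triples from subgraph-rank.
--     :param limit: how many triples from subgraph are needed.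
--     :return: First "limit" triples from subgraph with highest rank + all triples with last rank, last_rank.
--     """
--     ranked_triples: dict = {}
--     last_rank = 0
--     for triple_item, rank in sorted(
--         subgraph_triples_ranked.items(), key=lambda x: x[1], reverse=True
--     ):
--
--         if len(ranked_triples) < limit:
--             ranked_triples[triple_item] = rank
--             last_rank = rank
--         else:
--             if subgraph_triples_ranked[triple_item] == last_rank:
--                 ranked_triples[triple_item] = rank
--             else:
--                 break
--     return ranked_triples, last_rank
-- ===== SOURCE B (Python) =====
-- from typing import Dict
-- from typing import Tuple
--
--
-- def filter_table_until_last_rank(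
--     subgraph_triples_ranked: dict, limit: int
-- ) -> Tuple[Dict, int]:
--     """Select the top-`limit` triples plus all ties at the cutoff rank.
--
--     Instead of stably sorting the whole table and scanning it with a break,
--     find the cutoff rank (the rank of the limit-th best triple), then build the
--     answer by two filters: the strictly-higher-ranked triples (only those get
--     sorted) followed by all triples of exactly the cutoff rank in table order.
--     """
--     items = list(subgraph_triples_ranked.items())
--     n = len(items)
--     if limit <= 0 or n == 0:
--         return {}, 0
--     k = limit if limit < n else n
--     cutoff = sorted(rank for _, rank in items)[n - k]
--     higher = sorted((p for p in items if p[1] > cutoff), key=lambda p: p[1], reverse=True)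
--     ties = [p for p in items if p[1] == cutoff]
--     return dict(higher + ties), cutoff
-- ===== Notes on version B (the rewrite author's own statement) =====
-- stated objective: alternative
-- what changed: A stably sorts the whole table descending and scans it with a dict accumulator and a break; B computes the cutoff rank directly (the limit-th largest rank, read off a plain sort of the ranks), sorts only the strictly-higher-ranked triples, and appends the cutoff-rank ties in original table order.
-- intended difference: When limit <= 0 but the table's maximum rank is exactly 0, A still returns every rank-0 triple (with last_rank 0) because its tie-continuation compares against the initial last_rank = 0; B returns ({}, 0), the intended result of asking for at most 0 triples. — e.g. on filter_table_until_last_rank([("a", 0)], 0): A returns ([("a", 0)], 0), B returns ([], 0)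
import Mathlib
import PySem

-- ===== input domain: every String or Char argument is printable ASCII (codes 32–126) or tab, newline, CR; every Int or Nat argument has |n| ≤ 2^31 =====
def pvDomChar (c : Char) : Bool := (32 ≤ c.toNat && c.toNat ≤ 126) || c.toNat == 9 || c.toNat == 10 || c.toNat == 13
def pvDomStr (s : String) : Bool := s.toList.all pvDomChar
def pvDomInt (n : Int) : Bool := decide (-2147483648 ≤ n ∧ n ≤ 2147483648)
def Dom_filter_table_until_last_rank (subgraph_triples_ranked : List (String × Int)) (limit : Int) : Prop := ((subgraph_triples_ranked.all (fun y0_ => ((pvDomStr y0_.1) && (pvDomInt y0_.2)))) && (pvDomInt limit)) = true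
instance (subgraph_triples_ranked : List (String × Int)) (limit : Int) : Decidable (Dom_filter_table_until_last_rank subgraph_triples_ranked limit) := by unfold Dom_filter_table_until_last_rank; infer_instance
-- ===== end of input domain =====

-- B replaces A's full stable descending sort + break-scan by: compute the cutoff rank directly,
-- sort only the strictly-higher-ranked triples, and append the cutoff-rank ties in table order
-- (objective: alternative; return value only — neither version mutates its argument).

-- ===== PORT A =====
-- the loop body of A: `sorted(...)` already materialised as the list argument; acc is the
-- `ranked_triples` dict, `last` is `last_rank`.  `(PySem.Dict.mk orig).get? t` is Python's
-- `subgraph_triples_ranked[triple_item]`: the key always comes from that same dict, so the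
-- lookup is always `some` and the KeyError branch is unreachable.
def pvALoop (orig : List (String × Int)) (limit : Int) :
    List (String × Int) → PySem.Dict String Int → Int → PySem.Dict String Int × Int
  | [], acc, last => (acc, last)
  | (t, r) :: rest, acc, last =>
    if (acc.size : Int) < limit then
      pvALoop orig limit rest (acc.insert t r) r
    else if (PySem.Dict.mk orig).get? t = some last then
      pvALoop orig limit rest (acc.insert t r) last
    else (acc, last)  -- break

def filter_table_until_last_rank (subgraph_triples_ranked : List (String × Int)) (limit : Int) : (List (String × Int)) × Int :=
  let res := pvALoop subgraph_triples_ranked limit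
      (PySem.List.sorted subgraph_triples_ranked (fun p => p.2) true)
      (PySem.Dict.mk []) 0
  (res.1.items, res.2)

-- ===== PORT B =====
def filter_table_until_last_rank_alt (subgraph_triples_ranked : List (String × Int)) (limit : Int) : (List (String × Int)) × Int :=
  let n := subgraph_triples_ranked.length
  if limit ≤ 0 ∨ n = 0 then ([], 0)
  else
    let k : Nat := if limit < (n : Int) then limit.toNat else n
    -- sorted(ranks)[n - k]; the index is always in range, so the default is never used
    let cutoff := PySem.List.pyGetD
        (PySem.List.sorted (subgraph_triples_ranked.map (fun p => p.2)) (fun r => r) false)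
        ((n : Int) - (k : Int)) 0
    let higher := PySem.List.sorted
        (subgraph_triples_ranked.filter (fun p => decide (cutoff < p.2))) (fun p => p.2) true
    let ties := subgraph_triples_ranked.filter (fun p => p.2 == cutoff)
    (higher ++ ties, cutoff)

-- ===== PRECONDITION & SPEC =====
-- Pre_ excludes association lists with duplicate keys: they do not represent a Python dict
-- (a dict collapses duplicates before A ever runs), and on them first-match lookup vs
-- overwrite-insert makes the modelled behaviour accidental.
def Pre_filter_table_until_last_rank (subgraph_triples_ranked : List (String × Int)) (limit : Int) : Prop :=
  (subgraph_triples_ranked.map Prod.fst).Nodup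
instance (subgraph_triples_ranked : List (String × Int)) (limit : Int) : Decidable (Pre_filter_table_until_last_rank subgraph_triples_ranked limit) := by unfold Pre_filter_table_until_last_rank; infer_instance
def pvWitness_filter_table_until_last_rank : (List (String × Int)) × Int := ([("a", 1), ("b", 2)], 1)

-- When limit ≤ 0 but the table's maximum rank is exactly 0, A still returns every rank-0 triple
-- (with last_rank 0) because its tie-continuation compares against the initial last_rank = 0;
-- B returns ({}, 0), the intended result of asking for at most 0 triples.
def D_filter_table_until_last_rank (subgraph_triples_ranked : List (String × Int)) (limit : Int) : Prop :=
  limit ≤ 0 ∧ (∃ p ∈ subgraph_triples_ranked, p.2 = 0) ∧ (∀ p ∈ subgraph_triples_ranked, p.2 ≤ 0)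
instance (subgraph_triples_ranked : List (String × Int)) (limit : Int) : Decidable (D_filter_table_until_last_rank subgraph_triples_ranked limit) := by unfold D_filter_table_until_last_rank; infer_instance

def Spec_filter_table_until_last_rank (subgraph_triples_ranked : List (String × Int)) (limit : Int) (out : (List (String × Int)) × Int) : Prop := ¬ D_filter_table_until_last_rank subgraph_triples_ranked limit → out = filter_table_until_last_rank_alt subgraph_triples_ranked limit
instance (subgraph_triples_ranked : List (String × Int)) (limit : Int) (out : (List (String × Int)) × Int) : Decidable (Spec_filter_table_until_last_rank subgraph_triples_ranked limit out) := by unfold Spec_filter_table_until_last_rank; infer_instance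

def pvDiffWitness_filter_table_until_last_rank : (List (String × Int)) × Int := ([("a", 0)], 0)
def pvDiffWitnessOut_filter_table_until_last_rank : ((List (String × Int)) × Int) × ((List (String × Int)) × Int) := (([("a", 0)], 0), ([], 0))

-- ===== CLAIM (what is proved, stated in full; the proofs are below) =====
def Claim_unchanged_filter_table_until_last_rank : Prop := ∀ (subgraph_triples_ranked : List (String × Int)) (limit : Int), Dom_filter_table_until_last_rank subgraph_triples_ranked limit → Pre_filter_table_until_last_rank subgraph_triples_ranked limit → Spec_filter_table_until_last_rank subgraph_triples_ranked limit (filter_table_until_last_rank subgraph_triples_ranked limit)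
def Claim_changed_filter_table_until_last_rank : Prop := Dom_filter_table_until_last_rank (pvDiffWitness_filter_table_until_last_rank.1) (pvDiffWitness_filter_table_until_last_rank.2) ∧ Pre_filter_table_until_last_rank (pvDiffWitness_filter_table_until_last_rank.1) (pvDiffWitness_filter_table_until_last_rank.2) ∧ D_filter_table_until_last_rank (pvDiffWitness_filter_table_until_last_rank.1) (pvDiffWitness_filter_table_until_last_rank.2) ∧ filter_table_until_last_rank (pvDiffWitness_filter_table_until_last_rank.1) (pvDiffWitness_filter_table_until_last_rank.2) = pvDiffWitnessOut_filter_table_until_last_rank.1 ∧ filter_table_until_last_rank_alt (pvDiffWitness_filter_table_until_last_rank.1) (pvDiffWitness_filter_table_until_last_rank.2) = pvDiffWitnessOut_filter_table_until_last_rank.2 ∧ pvDiffWitnessOut_filter_table_until_last_rank.1 ≠ pvDiffWitnessOut_filter_table_until_last_rank.2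
def Claim_exact_filter_table_until_last_rank : Prop := ∀ (subgraph_triples_ranked : List (String × Int)) (limit : Int), Dom_filter_table_until_last_rank subgraph_triples_ranked limit → Pre_filter_table_until_last_rank subgraph_triples_ranked limit → D_filter_table_until_last_rank subgraph_triples_ranked limit → filter_table_until_last_rank subgraph_triples_ranked limit ≠ filter_table_until_last_rank_alt subgraph_triples_ranked limit

-- ===== LEMMAS AND PROOFS =====

def pvAList (limit : Int) : Int → Int → List (String × Int) → List (String × Int) × Int
  | _, last, [] => ([], last)
  | sz, last, p :: rest =>
    if sz < limit then
      let r := pvAList limit (sz + 1) p.2 rest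
      (p :: r.1, r.2)
    else if p.2 = last then
      let r := pvAList limit (sz + 1) last rest
      (p :: r.1, r.2)
    else ([], last)

theorem pvAList_eq (limit : Int) (S : List (String × Int)) :
    ∀ (sz last : Int),
    pvAList limit sz last S =
      (let m := min (limit - sz).toNat S.length
       let c := if m = 0 then last else (S.getD (m - 1) ("", 0)).2
       (S.take m ++ (S.drop m).takeWhile (fun p => p.2 == c), c)) := by
  induction S with
  | nil => intro sz last; simp [pvAList]
  | cons p rest ih =>
    intro sz last
    by_cases hlt : sz < limit
    · have hm : min (limit - sz).toNat (p :: rest).length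
          = min (limit - (sz + 1)).toNat rest.length + 1 := by
        simp only [List.length_cons]
        omega
      simp only [pvAList, hlt, if_pos, ih (sz + 1) p.2, hm]
      set m' := min (limit - (sz + 1)).toNat rest.length with hm'
      by_cases h0 : m' = 0
      · simp [h0, List.takeWhile_cons]
      · have h1 : m' - 1 + 1 = m' := by omega
        simp only [h0, if_false, Nat.add_sub_cancel]
        have hge : (p :: rest)[m']? = rest[m' - 1]? := by
          rw [← h1]; simp
        simp [List.take_succ_cons, List.drop_succ_cons, h0, List.getD, hge]
    · have hm : min (limit - sz).toNat (p :: rest).length = 0 := by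
        simp only [List.length_cons]; omega
      have hm2 : min (limit - (sz + 1)).toNat rest.length = 0 := by omega
      by_cases hpl : p.2 = last
      · simp only [pvAList, hlt, if_false, hpl, if_pos, ih (sz + 1) last, hm, hm2]
        simp [List.takeWhile_cons, hpl]
      · simp only [pvAList, hlt, if_false, hpl, hm]
        simp [List.takeWhile_cons, hpl]

theorem pvALoop_eq_model(orig : List (String × Int)) (limit : Int)
    (S : List (String × Int)) :
    ∀ (acc : PySem.Dict String Int) (last : Int),
    (∀ p ∈ S, (PySem.Dict.mk orig).get? p.1 = some p.2) →
    (S.map Prod.fst).Nodup →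
    acc.keys.Nodup →
    (∀ p ∈ S, acc.contains p.1 = false) →
    (pvALoop orig limit S acc last).1.items
        = acc.items ++ (pvAList limit (acc.size : Int) last S).1
      ∧ (pvALoop orig limit S acc last).2 = (pvAList limit (acc.size : Int) last S).2 := by
  induction S with
  | nil => intro acc last _ _ _ _; simp [pvALoop, pvAList]
  | cons q rest ih =>
    intro acc last hget hnd hknd hfresh
    obtain ⟨t, r⟩ := q
    have hct : acc.contains t = false := hfresh (t, r) (.head _)
    have hitems : (acc.insert t r).items = acc.items ++ [(t, r)] :=
      PySem.Dict.items_insert_of_not_contains acc r hct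
    have hsize : ((acc.insert t r).size : Int) = (acc.size : Int) + 1 := by
      rw [PySem.Dict.size_insert]
      simp [hct]
    have hkeys : (acc.insert t r).keys = acc.keys ++ [t] :=
      PySem.Dict.keys_insert_of_not_contains acc r hct
    have hknd' : (acc.insert t r).keys.Nodup := by
      rw [hkeys]
      refine List.Nodup.append hknd (List.nodup_singleton t) ?_
      intro a ha hb
      have : a = t := by simpa using hb
      subst this
      exact absurd ((PySem.Dict.contains_iff_mem_keys acc a).mpr ha) (by simp [hct])
    have hnd' : (rest.map Prod.fst).Nodup := by
      simpa using hnd.of_cons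
    have htnotin : t ∉ rest.map Prod.fst := by
      have h := hnd
      simp only [List.map_cons] at h
      exact (List.nodup_cons.mp h).1
    have hfresh' : ∀ p ∈ rest, (acc.insert t r).contains p.1 = false := by
      intro p hp
      rw [PySem.Dict.contains_insert]
      have h1 : p.1 ≠ t := by
        intro e
        exact htnotin (e ▸ List.mem_map_of_mem hp)
      have h2 : acc.contains p.1 = false := hfresh p (.tail _ hp)
      simp [h1, h2]
    have hget' : ∀ p ∈ rest, (PySem.Dict.mk orig).get? p.1 = some p.2 :=
      fun p hp => hget p (.tail _ hp)
    by_cases hlt : (acc.size : Int) < limit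
    · have := ih (acc.insert t r) r hget' hnd' hknd' hfresh'
      simp only [pvALoop, pvAList, hlt, if_pos, hsize] at this ⊢
      rw [this.1, this.2, hitems]
      simp
    · have hg : (PySem.Dict.mk orig).get? t = some r := hget (t, r) (.head _)
      by_cases heq : r = last
      · subst heq
        have := ih (acc.insert t r) r hget' hnd' hknd' hfresh'
        simp only [pvALoop, pvAList, hlt, if_false, hg, if_pos, hsize] at this ⊢
        rw [this.1, this.2, hitems]
        simp
      · have hcond : ¬ (PySem.Dict.mk orig).get? t = some last := by
          rw [hg]; simp [heq]
        simp only [pvALoop, pvAList, hlt, if_false, hcond, heq]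
        simp

theorem filter_gt_eq_nil (c : Int) (S : List (String × Int)) (h : ∀ p ∈ S, p.2 ≤ c) :
    S.filter (fun p => decide (c < p.2)) = [] := by
  simp only [List.filter_eq_nil_iff, decide_eq_true_eq]
  intro p hp; have := h p hp; omega

theorem filter_eq_takeWhile_of_desc (c : Int) : ∀ (S : List (String × Int)),
    S.Pairwise (fun a b => b.2 ≤ a.2) → (∀ p ∈ S, p.2 ≤ c) →
    S.filter (fun p => p.2 == c) = S.takeWhile (fun p => p.2 == c) := by
  intro S
  induction S with
  | nil => simp
  | cons p rest ih =>
    intro hp hb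
    rcases List.pairwise_cons.mp hp with ⟨h1, h2⟩
    by_cases hpc : p.2 = c
    · simp only [List.filter_cons, List.takeWhile_cons, hpc, beq_self_eq_true, if_pos]
      rw [ih h2 (fun q hq => hb q (.tail _ hq))]
    · have hlt : p.2 < c := lt_of_le_of_ne (hb p (.head _)) hpc
      have hnil : rest.filter (fun q => q.2 == c) = [] := by
        simp only [List.filter_eq_nil_iff, beq_iff_eq]
        intro q hq; have := h1 q hq; omega
      simp [List.filter_cons, List.takeWhile_cons, hpc, hnil]

theorem takeWhile_split (c : Int) : ∀ (k : Nat) (S : List (String × Int)),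
    (∀ p ∈ S.take k, p.2 = c) →
    S.takeWhile (fun p => p.2 == c) = S.take k ++ (S.drop k).takeWhile (fun p => p.2 == c) := by
  intro k
  induction k with
  | zero => simp
  | succ k ih =>
    intro S h
    cases S with
    | nil => simp
    | cons p rest =>
      have hp : p.2 = c := h p (by simp)
      simp only [List.take_succ_cons, List.drop_succ_cons, List.takeWhile_cons, hp,
        beq_self_eq_true, if_pos, List.cons_append]
      rw [ih rest (fun q hq => h q (by simp [hq]))]

theorem take_takeWhile_eq_filters(c : Int) : ∀ (S : List (String × Int)) (k : Nat),
    S.Pairwise (fun a b => b.2 ≤ a.2) → 1 ≤ k → k ≤ S.length →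
    (S.getD (k - 1) ("", 0)).2 = c →
    S.take k ++ (S.drop k).takeWhile (fun p => p.2 == c)
      = S.filter (fun p => decide (c < p.2)) ++ S.filter (fun p => p.2 == c) := by
  intro S
  induction S with
  | nil => intro k _ hk1 hk2 _; simp at hk2; omega
  | cons p rest ih =>
    intro k hp hk1 hk2 hc
    rcases List.pairwise_cons.mp hp with ⟨h1, h2⟩
    match k, hk1 with
    | 1, _ =>
      -- c is the head's rank
      have hpc : p.2 = c := by simpa [List.getD] using hc
      have hb : ∀ q ∈ rest, q.2 ≤ c := fun q hq => hpc ▸ h1 q hq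
      have hgt : rest.filter (fun q => decide (c < q.2)) = [] := filter_gt_eq_nil c rest hb
      have e1 : List.take 1 (p :: rest) = [p] := rfl
      have e2 : List.drop 1 (p :: rest) = rest := rfl
      rw [e1, e2]
      simp only [List.filter_cons, hpc, beq_self_eq_true, if_pos, decide_eq_true_eq,
        lt_irrefl, decide_false, Bool.false_eq_true, if_false, hgt, List.nil_append,
        List.singleton_append]
      rw [filter_eq_takeWhile_of_desc c rest h2 hb]
    | (k'' + 1), _ =>
      by_cases hk0 : k'' = 0
      · subst hk0
        have hpc : p.2 = c := by simpa [List.getD] using hc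
        have hb : ∀ q ∈ rest, q.2 ≤ c := fun q hq => hpc ▸ h1 q hq
        have hgt : rest.filter (fun q => decide (c < q.2)) = [] := filter_gt_eq_nil c rest hb
        have e1 : List.take (0 + 1) (p :: rest) = [p] := rfl
        have e2 : List.drop (0 + 1) (p :: rest) = rest := rfl
        rw [e1, e2]
        simp only [List.filter_cons, hpc, beq_self_eq_true, if_pos, decide_eq_true_eq,
          lt_irrefl, decide_false, Bool.false_eq_true, if_false, hgt, List.nil_append,
          List.singleton_append]
        rw [filter_eq_takeWhile_of_desc c rest h2 hb]
      · -- k'' ≥ 1, c is inside rest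
        have hk2' : k'' ≤ rest.length := by simpa using hk2
        have hc' : (rest.getD (k'' - 1) ("", 0)).2 = c := by
          have : (k'' + 1) - 1 = (k'' - 1) + 1 := by omega
          rw [this] at hc
          simpa [List.getD] using hc
        have hmem : rest.getD (k'' - 1) ("", 0) ∈ rest := by
          have hlt : k'' - 1 < rest.length := by omega
          rw [List.getD_eq_getElem _ _ hlt]
          exact List.getElem_mem hlt
        have hcp : c ≤ p.2 := hc' ▸ h1 _ hmem
        by_cases hgt : c < p.2
        · -- head strictly above the cutoff
          have e := ih k'' h2 (by omega) hk2' hc'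
          simp only [List.take_succ_cons, List.drop_succ_cons, List.filter_cons,
            decide_eq_true_eq, hgt, if_pos, decide_true]
          have hpc : (p.2 == c) = false := by simp; omega
          rw [hpc]
          simp only [Bool.false_eq_true, if_false, List.cons_append]
          rw [e]
        · -- head rank equals the cutoff: everything in sight has rank c
          have hpc : p.2 = c := by omega
          have hb : ∀ q ∈ rest, q.2 ≤ c := fun q hq => hpc ▸ h1 q hq
          have hgtnil : (p :: rest).filter (fun q => decide (c < q.2)) = [] :=
            filter_gt_eq_nil c _ (by
              intro q hq
              rcases List.mem_cons.mp hq with h | h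
              · subst h; omega
              · exact hb q h)
          -- the first k'' elements of rest all have rank c
          have htake : ∀ q ∈ rest.take k'', q.2 = c := by
            intro q hq
            rcases List.mem_iff_getElem.mp hq with ⟨i, hi, rfl⟩
            have hile : i < k'' := by
              have h' := hi
              simp [List.length_take] at h'
              omega
            have hig : (rest.take k'')[i] = rest[i]'(by omega) := by
              simp [List.getElem_take]
            rw [hig]
            have hle : rest[i].2 ≤ c := hb _ (List.getElem_mem _)
            have hge : c ≤ rest[i].2 := by
              have hkl : k'' - 1 < rest.length := by omega
              have hcc : rest[k'' - 1].2 = c := by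
                rw [← List.getD_eq_getElem rest ("", 0) hkl]; exact hc'
              by_cases hik : i = k'' - 1
              · subst hik; omega
              · have hilt : i < k'' - 1 := by omega
                have := (List.pairwise_iff_getElem.mp h2) i (k'' - 1) (by omega) hkl hilt
                omega
            omega
          rw [hgtnil, List.nil_append]
          simp only [List.take_succ_cons, List.drop_succ_cons, List.filter_cons, hpc,
            beq_self_eq_true, if_pos, List.cons_append]
          rw [filter_eq_takeWhile_of_desc c rest h2 hb, takeWhile_split c k'' rest htake]

theorem insertBy_head_lt (x : String × Int) : ∀ (zs : List (String × Int)),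
    (∀ z ∈ zs, z.2 < x.2) →
    PySem.List.insertBy (fun a b => decide (b.2 < a.2)) x zs = x :: zs := by
  intro zs h
  cases zs with
  | nil => simp [PySem.List.insertBy]
  | cons z t => have := h z (.head _); simp [PySem.List.insertBy, this]

theorem insertBy_filter_false (p : String × Int → Bool) (x : String × Int) (hx : p x = false) :
    ∀ (ys : List (String × Int)),
    (PySem.List.insertBy (fun a b => decide (b.2 < a.2)) x ys).filter p = ys.filter p := by
  intro ys
  induction ys with
  | nil => simp [PySem.List.insertBy, hx]
  | cons y ys ih =>
    by_cases hb : y.2 < x.2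
    · simp [PySem.List.insertBy, hb, List.filter_cons, hx]
    · simp only [PySem.List.insertBy, decide_eq_true_eq, hb, if_false, List.filter_cons]
      rw [ih]

theorem insertBy_filter_true (p : String × Int → Bool) (x : String × Int) (hx : p x = true) :
    ∀ (ys : List (String × Int)), ys.Pairwise (fun a b => b.2 ≤ a.2) →
    (PySem.List.insertBy (fun a b => decide (b.2 < a.2)) x ys).filter p
      = PySem.List.insertBy (fun a b => decide (b.2 < a.2)) x (ys.filter p) := by
  intro ys
  induction ys with
  | nil => simp [PySem.List.insertBy, hx]
  | cons y ys ih =>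
    intro hp
    rcases List.pairwise_cons.mp hp with ⟨h1, h2⟩
    by_cases hb : y.2 < x.2
    · by_cases hy : p y = true
      · simp [PySem.List.insertBy, hb, hx, hy]
      · have hall : ∀ z ∈ ys.filter p, z.2 < x.2 := by
          intro z hz
          have := h1 z (List.mem_of_mem_filter hz)
          omega
        simp only [PySem.List.insertBy, decide_eq_true_eq, hb, if_true, List.filter_cons, hx,
          if_pos, hy, Bool.false_eq_true, if_false]
        rw [insertBy_head_lt x _ hall]
    · by_cases hy : p y = true
      · simp only [PySem.List.insertBy, decide_eq_true_eq, hb, if_false, List.filter_cons, hy,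
          if_true]
        rw [ih h2]
      · simp only [PySem.List.insertBy, decide_eq_true_eq, hb, if_false, List.filter_cons, hy,
          Bool.false_eq_true]
        rw [ih h2]

theorem sorted_append_singleton (xs : List (String × Int)) (x : String × Int) :
    PySem.List.sorted (xs ++ [x]) (fun q => q.2) true
      = PySem.List.insertBy (fun a b => decide (b.2 < a.2)) x
          (PySem.List.sorted xs (fun q => q.2) true) := by
  rw [PySem.List.sorted_rev_eq_foldl_insertBy, List.foldl_append,
    ← PySem.List.sorted_rev_eq_foldl_insertBy]
  rfl

theorem sorted_filter_comm (p : String × Int → Bool) (xs : List (String × Int)) :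
    (PySem.List.sorted xs (fun q => q.2) true).filter p
      = PySem.List.sorted (xs.filter p) (fun q => q.2) true := by
  induction xs using List.reverseRecOn with
  | nil => simp [PySem.List.sorted]
  | append_singleton xs x ih =>
    rw [sorted_append_singleton]
    by_cases hx : p x = true
    · rw [insertBy_filter_true p x hx _ (PySem.List.sorted_pairwise_rev xs (fun q => q.2)), ih]
      have h2 : (xs ++ [x]).filter p = xs.filter p ++ [x] := by
        simp [List.filter_append, hx]
      rw [h2, sorted_append_singleton]
    · rw [insertBy_filter_false p x (Bool.not_eq_true _ ▸ hx), ih]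
      have h2 : (xs ++ [x]).filter p = xs.filter p := by
        simp [List.filter_append, hx]
      rw [h2]

theorem cutoff_eq (l : List (String × Int)) (k : Nat) (hk1 : 1 ≤ k) (hk2 : k ≤ l.length) :
    (PySem.List.sorted (l.map (fun p => p.2)) (fun r => r) false).getD (l.length - k) 0
      = ((PySem.List.sorted l (fun p => p.2) true).getD (k - 1) ("", 0)).2 := by
  set S := PySem.List.sorted l (fun p => p.2) true with hS
  set asc := PySem.List.sorted (l.map (fun p => p.2)) (fun r => r) false with hasc
  have hlenS : S.length = l.length := by rw [hS]; exact PySem.List.length_sorted _ _ _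
  have hlenA : asc.length = l.length := by
    rw [hasc]; rw [PySem.List.length_sorted]; simp
  have hmapeq : S.map (fun p => p.2) = asc.reverse := by
    have h1 : (S.map (fun p => p.2)).Pairwise (fun a b : Int => b ≤ a) :=
      List.Pairwise.map _ (fun a b h => h) (PySem.List.sorted_pairwise_rev l fun p => p.2)
    have h2 : (asc.reverse).Pairwise (fun a b : Int => b ≤ a) := by
      rw [List.pairwise_reverse]
      exact PySem.List.sorted_pairwise (l.map fun p => p.2) (fun r => r)
    have hp : (S.map (fun p => p.2)).Perm (asc.reverse) :=
      ((PySem.List.sorted_perm l _ true).map _).trans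
        (((PySem.List.sorted_perm (l.map fun p => p.2) _ false).symm).trans
          (asc.reverse_perm).symm)
    exact hp.eq_of_pairwise (le := fun a b : Int => b ≤ a) (by intro a b _ _ h h'; omega) h1 h2
  have hik : k - 1 < S.length := by omega
  have hia : l.length - k < asc.length := by omega
  rw [List.getD_eq_getElem _ _ hia, List.getD_eq_getElem _ _ hik]
  have e1 : S[k-1].2 = (S.map (fun p => p.2))[k-1]'(by simp; omega) := by simp
  rw [e1]
  have e2 : (S.map (fun p => p.2))[k-1]'(by simp; omega)
      = (asc.reverse)[k-1]'(by simp [hlenA]; omega) := by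
    congr 1
  rw [List.getElem_reverse] at e2
  rw [e2]
  congr 1
  omega

-- A, rewritten through the pure-list model of its loop
theorem A_eq_model (l : List (String × Int)) (limit : Int)
    (hnd : (l.map Prod.fst).Nodup) :
    filter_table_until_last_rank l limit
      = ((pvAList limit 0 0 (PySem.List.sorted l (fun p => p.2) true)).1,
         (pvAList limit 0 0 (PySem.List.sorted l (fun p => p.2) true)).2) := by
  set S := PySem.List.sorted l (fun p => p.2) true with hS
  have hgetS : ∀ p ∈ S, (PySem.Dict.mk l).get? p.1 = some p.2 := by
    intro p hp
    have hpl : p ∈ l := (PySem.List.mem_sorted l _ true p).mp hp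
    have hmem : (p.1, p.2) ∈ (PySem.Dict.mk l).items := by simpa using hpl
    exact PySem.Dict.get?_of_mem_items _ hmem (by simpa using hnd)
  have hndS : (S.map Prod.fst).Nodup :=
    (((PySem.List.sorted_perm l (fun p => p.2) true).map Prod.fst).nodup_iff).mpr hnd
  have base := pvALoop_eq_model l limit S (PySem.Dict.mk []) 0 hgetS hndS
    (by simp) (fun p _ => rfl)
  show ((pvALoop l limit S (PySem.Dict.mk []) 0).1.items,
        (pvALoop l limit S (PySem.Dict.mk []) 0).2) = _
  rw [base.1, base.2]
  rfl

-- the rank-c triples of l form a key-descending list (all keys equal)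
theorem pairwise_filter_eq (l : List (String × Int)) (c : Int) :
    (l.filter (fun p => p.2 == c)).Pairwise (fun a b => b.2 ≤ a.2) := by
  refine List.pairwise_iff_getElem.mpr ?_
  intro i j hi hj _
  have h1 := List.of_mem_filter (l := l) (List.getElem_mem hi)
  have h2 := List.of_mem_filter (l := l) (List.getElem_mem hj)
  simp only [beq_iff_eq] at h1 h2
  omega

-- when limit ≤ 0, A returns the run of rank-0 triples heading its sort
theorem A_nonpos_limit (l : List (String × Int)) (limit : Int)
    (hnd : (l.map Prod.fst).Nodup) (hlim : limit ≤ 0) :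
    filter_table_until_last_rank l limit
      = ((PySem.List.sorted l (fun p => p.2) true).takeWhile (fun p => p.2 == (0 : Int)), 0) := by
  rw [A_eq_model l limit hnd, pvAList_eq]
  have h0 : limit.toNat = 0 := by omega
  simp [h0]

-- ===== VERDICT (by name: the statement is the Claim_ definition above) =====
theorem filter_table_until_last_rank_spec : Claim_unchanged_filter_table_until_last_rank := by
  intro l limit _ hnd hD
  by_cases hlim : limit ≤ 0
  · -- outside D_ with limit ≤ 0 both sides are ([], 0)
    rw [A_nonpos_limit l limit hnd hlim]
    have hB : filter_table_until_last_rank_alt l limit = ([], 0) := by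
      simp [filter_table_until_last_rank_alt, hlim]
    rw [hB]
    refine Prod.ext ?_ rfl
    cases hS : PySem.List.sorted l (fun p => p.2) true with
    | nil => simp
    | cons p t =>
      have hpl : p ∈ l := (PySem.List.mem_sorted l _ true p).mp (by rw [hS]; simp)
      have hp2 : p.2 ≠ 0 := by
        by_cases hex : ∃ q ∈ l, q.2 = 0
        · have hnall : ¬ ∀ q ∈ l, q.2 ≤ 0 := fun h => hD ⟨hlim, hex, h⟩
          push_neg at hnall
          rcases hnall with ⟨q, hq, hq0⟩
          have h2 : q.2 ≤ p.2 := PySem.List.key_head_sorted_rev_ge l (fun p => p.2) hS q hq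
          omega
        · push_neg at hex
          exact hex p hpl
      simp [List.takeWhile_cons, hp2]
  · push_neg at hlim
    by_cases hnil : l = []
    · subst hnil
      rw [A_eq_model [] limit (by simp)]
      simp [pvAList, PySem.List.sorted, filter_table_until_last_rank_alt]
    · have hn : 1 ≤ l.length := List.length_pos_iff.mpr hnil
      set S := PySem.List.sorted l (fun p => p.2) true with hSdef
      have hlenS : S.length = l.length := PySem.List.length_sorted _ _ _
      set k : Nat := if limit < (l.length : Int) then limit.toNat else l.length with hk
      have hkk : 1 ≤ k ∧ k ≤ l.length := by rw [hk]; split <;> omega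
      set c : Int := (S.getD (k - 1) ("", 0)).2 with hcdef
      have hA : filter_table_until_last_rank l limit
          = (S.take k ++ (S.drop k).takeWhile (fun p => p.2 == c), c) := by
        rw [A_eq_model l limit hnd, pvAList_eq]
        have hm : min (limit - 0).toNat S.length = k := by
          rw [hlenS, hk]; split <;> omega
        have hk0 : ¬ k = 0 := by omega
        simp only [← hSdef, hm, hk0, if_false, hcdef]
      have hcut : PySem.List.pyGetD
            (PySem.List.sorted (l.map fun p => p.2) (fun r => r) false)
            ((l.length : Int) - (k : Int)) 0 = c := by
        rw [PySem.List.pyGetD_of_nonneg _ _ (by omega)]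
        have he : ((l.length : Int) - (k : Int)).toNat = l.length - k := by omega
        rw [he, hcdef, hSdef]
        exact cutoff_eq l k hkk.1 hkk.2
      have hB : filter_table_until_last_rank_alt l limit
          = (PySem.List.sorted (l.filter fun p => decide (c < p.2)) (fun p => p.2) true
              ++ l.filter (fun p => p.2 == c), c) := by
        have hcond : ¬ (limit ≤ 0 ∨ l.length = 0) := by omega
        simp only [filter_table_until_last_rank_alt, ← hk, hcut, hcond, if_false]
      rw [hA, hB]
      refine Prod.ext ?_ rfl
      show S.take k ++ (S.drop k).takeWhile (fun p => p.2 == c) = _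
      rw [take_takeWhile_eq_filters c S k (hSdef ▸ PySem.List.sorted_pairwise_rev l _)
        hkk.1 (by omega) rfl]
      rw [hSdef, sorted_filter_comm, sorted_filter_comm,
        PySem.List.sorted_rev_eq_self_of_pairwise _ _ (pairwise_filter_eq l c)]

theorem filter_table_until_last_rank_changed : Claim_changed_filter_table_until_last_rank := by
  unfold Claim_changed_filter_table_until_last_rank; decide

theorem filter_table_until_last_rank_tight : Claim_exact_filter_table_until_last_rank := by
  intro l limit _ hnd hDd
  rcases hDd with ⟨hlim, ⟨q, hq, hq0⟩, hall⟩
  have hA := A_nonpos_limit l limit hnd hlim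
  have hB : filter_table_until_last_rank_alt l limit = ([], 0) := by
    simp [filter_table_until_last_rank_alt, hlim]
  rw [hA, hB]
  intro hcon
  have h1 := congrArg Prod.fst hcon
  simp only at h1
  cases hS : PySem.List.sorted l (fun p => p.2) true with
  | nil =>
    have : l = [] := (PySem.List.sorted_eq_nil_iff l _ true).mp hS
    subst this; simp at hq
  | cons p t =>
    have hple : p.2 ≤ 0 := by
      have hpl : p ∈ l := (PySem.List.mem_sorted l _ true p).mp (by rw [hS]; simp)
      exact hall p hpl
    have hpge : (0:Int) ≤ p.2 := by
      have h2 : q.2 ≤ p.2 := PySem.List.key_head_sorted_rev_ge l (fun p => p.2) hS q hq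
      omega
    have hp0 : p.2 = 0 := le_antisymm hple hpge
    rw [hS] at h1
    simp [List.takeWhile_cons, hp0] at h1
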